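-- pv_equiv track=rewrite | github.com/euxcet/AutoAction | backend/server/src/detect.py | calc_max_pos
-- ===== SOURCE A (Python) =====
-- def calc_max_pos(x):
--     res = 0
--     pos = 0
--     for i in range(0, len(x), 6):
--         for j in range(3, 6):
--             if x[i + j] > res:
--                 res = x[i + j]
--                 pos = i // 6
--     return pos
-- ===== SOURCE B (Python) =====
-- def calc_max_pos(x):
--     # build-table-then-argmax: per-block maxima of columns 3..5, then first argmax
--     blocks = [max(x[i + 3], x[i + 4], x[i + 5]) for i in range(0, len(x), 6)]
--     best = max(blocks, default=0)
--     if best <= 0: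
--         return 0
--     return blocks.index(best)
-- ===== Notes on version B (the rewrite author's own statement) =====
-- stated objective: alternative
-- what changed: Replaces A's single interleaved running-max/position tracking pass with a build-table-then-argmax decomposition: first a list of per-block maxima, then max with default 0 and list.index for the first argmax.
import Mathlib
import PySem

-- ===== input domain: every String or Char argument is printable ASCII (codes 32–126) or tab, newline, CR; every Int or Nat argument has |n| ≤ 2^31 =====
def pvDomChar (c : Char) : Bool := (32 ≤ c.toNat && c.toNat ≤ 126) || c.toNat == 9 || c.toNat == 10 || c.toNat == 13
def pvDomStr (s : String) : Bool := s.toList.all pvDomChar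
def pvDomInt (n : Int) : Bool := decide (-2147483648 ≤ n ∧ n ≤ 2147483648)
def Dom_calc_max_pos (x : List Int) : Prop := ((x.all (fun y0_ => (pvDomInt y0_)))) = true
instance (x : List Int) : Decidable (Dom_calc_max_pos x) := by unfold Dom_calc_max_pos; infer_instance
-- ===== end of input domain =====

-- B replaces A's interleaved running-max/position pass with a build-table-then-argmax
-- decomposition (per-block maxima list, then max with default 0 and first-index lookup).


-- ===== PORT A =====
-- x[i+j] is in range on every input admitted by Pre_ (length a multiple of 6), so pyGetD's
-- default is never read there.
def calc_max_pos (x : List Int) : Int :=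
  let s := (PySem.List.pyRange 0 (x.length : Int) 6).foldl
    (fun (s : Int × Int) i =>
      (PySem.List.pyRange 3 6 1).foldl
        (fun (s : Int × Int) j =>
          if PySem.List.pyGetD x (i + j) 0 > s.1 then
            (PySem.List.pyGetD x (i + j) 0, PySem.Int.floordiv i 6)
          else s) s)
    (0, 0)
  s.2

-- ===== PORT B =====
-- blocks.index(best) never raises (best is drawn from blocks), so .getD 0 is never read.
def calc_max_pos_alt (x : List Int) : Int :=
  let blocks := (PySem.List.pyRange 0 (x.length : Int) 6).map (fun i =>
    max (max (PySem.List.pyGetD x (i + 3) 0) (PySem.List.pyGetD x (i + 4) 0))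
        (PySem.List.pyGetD x (i + 5) 0))
  let best := PySem.List.maxD blocks id 0
  if best ≤ 0 then 0 else ((PySem.List.index? blocks best).getD 0 : Nat)

-- ===== PRECONDITION & SPEC =====
-- Pre_ excludes exactly the inputs on which A raises IndexError: lengths that are not a
-- multiple of 6 (the trailing block lacks one of the indices i+3..i+5).
def Pre_calc_max_pos (x : List Int) : Prop := x.length % 6 = 0
instance (x : List Int) : Decidable (Pre_calc_max_pos x) := by unfold Pre_calc_max_pos; infer_instance
def pvWitness_calc_max_pos : List Int := [0, 0, 0, 2, 5, 5, 0, 0, 0, 5, 1, 1]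
def Spec_calc_max_pos (x : List Int) (out : Int) : Prop := out = calc_max_pos_alt x
instance (x : List Int) (out : Int) : Decidable (Spec_calc_max_pos x out) := by unfold Spec_calc_max_pos; infer_instance

-- ===== CLAIM (what is proved, stated in full; the proofs are below) =====
def Claim_equal_calc_max_pos : Prop := ∀ (x : List Int), Dom_calc_max_pos x → Pre_calc_max_pos x → Spec_calc_max_pos x (calc_max_pos x)

-- ===== LEMMAS AND PROOFS =====

-- A's pass, abstracted over the list of per-block maxima: running max r, position p,
-- current block index t.
def pvGo (l : List Int) (t : Int) (s : Int × Int) : Int × Int :=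
  match l with
  | [] => s
  | b :: rest => pvGo rest (t + 1) (if b > s.1 then (b, t) else s)

theorem pv_foldl_max_mem (l : List Int) : ∀ (a : Int), l.foldl max a > a → l.foldl max a ∈ l := by
  induction l with
  | nil => intro a h; simp at h
  | cons c s ih =>
      intro a h
      simp only [List.foldl_cons] at h ⊢
      by_cases hca : c > a
      · have hx : max a c = c := by omega
        rw [hx] at h ⊢
        by_cases hs : s.foldl max c > c
        · exact List.mem_cons_of_mem _ (ih c hs)
        · have hle := (PySem.List.le_foldl_max s c).1
          have : s.foldl max c = c := by omega
          rw [this]; exact List.mem_cons_self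
      · have hx : max a c = a := by omega
        rw [hx] at h ⊢
        exact List.mem_cons_of_mem _ (ih a h)

theorem pvGo_spec (l : List Int) : ∀ (t r p : Int),
    pvGo l t (r, p) =
      if l.foldl max r > r then
        (l.foldl max r, t + ((PySem.List.index? l (l.foldl max r)).getD 0 : Nat))
      else (r, p) := by
  induction l with
  | nil => intro t r p; simp [pvGo]
  | cons b rest ih =>
      intro t r p
      have hmono := (PySem.List.le_foldl_max rest (max r b)).1
      simp only [pvGo, List.foldl_cons]
      by_cases hb : b > r
      · have hrb : max r b = b := by omega
        rw [hrb] at hmono ⊢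
        simp only [hb, if_pos]
        rw [ih (t + 1) b t]
        by_cases hM : rest.foldl max b > b
        · have hMr : rest.foldl max b > r := by omega
          have hne : (b == rest.foldl max b) = false := by
            simp only [beq_eq_false_iff_ne, ne_eq]; omega
          rcases h : List.findIdx? (fun x => x == List.foldl max b rest) rest with _ | k
          · exfalso
            have hmem := pv_foldl_max_mem rest b hM
            have := List.findIdx?_eq_none_iff.mp h _ hmem
            simp at this
          · simp only [hM, if_pos, hMr, PySem.List.index?, List.idxOf?, List.findIdx?_cons,
              hne, h, Option.map_some, Option.getD_some, Prod.mk.injEq, true_and,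
              Bool.false_eq_true, if_false]
            push_cast; ring
        · have heq : rest.foldl max b = b := by omega
          rw [heq]
          simp [hb, PySem.List.index?, List.idxOf?, List.findIdx?_cons]
      · have hrb : max r b = r := by omega
        rw [hrb] at hmono ⊢
        simp only [hb, ite_false]
        rw [ih (t + 1) r p]
        by_cases hM : rest.foldl max r > r
        · have hne : (b == rest.foldl max r) = false := by
            simp only [beq_eq_false_iff_ne, ne_eq]; omega
          rcases h : List.findIdx? (fun x => x == List.foldl max r rest) rest with _ | k
          · exfalso
            have hmem := pv_foldl_max_mem rest r hM
            have := List.findIdx?_eq_none_iff.mp h _ hmem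
            simp at this
          · simp only [hM, if_pos, PySem.List.index?, List.idxOf?, List.findIdx?_cons,
              hne, h, Option.map_some, Option.getD_some, Prod.mk.injEq, true_and,
              Bool.false_eq_true, if_false]
            push_cast; ring
        · simp [hM]

-- inner loop of A over [3,4,5]: one strict-max update with a fixed recorded position
theorem pv_three (a b c d r p : Int) :
    List.foldl (fun (s : Int × Int) (v : Int) => if v > s.1 then (v, d) else s) (r, p) [a, b, c]
      = if max (max a b) c > r then (max (max a b) c, d) else (r, p) := by
  simp only [List.foldl]
  split_ifs <;> simp_all [Prod.ext_iff] <;> omega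

theorem pvGo_append (l : List Int) : ∀ (v t : Int) (s : Int × Int),
    pvGo (l ++ [v]) t s =
      if v > (pvGo l t s).1 then (v, t + l.length) else pvGo l t s := by
  induction l with
  | nil => intro v t s; simp [pvGo]
  | cons b rest ih =>
      intro v t s
      simp only [List.cons_append, pvGo, ih, List.length_cons]
      push_cast
      rw [show t + 1 + (rest.length : Int) = t + ((rest.length : Int) + 1) from by ring]

theorem pvGo_range (f : Nat → Int) (k : Nat) (s : Int × Int) :
    (List.range k).foldl (fun s (j : Nat) => if f j > s.1 then (f j, (j : Int)) else s) s
      = pvGo ((List.range k).map f) 0 s := by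
  induction k with
  | zero => simp [pvGo]
  | succ n ih =>
      rw [List.range_succ, List.foldl_append, List.map_append, List.map_cons, List.map_nil,
        pvGo_append, ih]
      simp

theorem pv_maxD_eq (L : List Int) (h : L.foldl max 0 > 0) :
    PySem.List.maxD L id 0 = L.foldl max 0 := by
  have hmem := pv_foldl_max_mem L 0 h
  rcases hm : PySem.List.max? L id with _ | m
  · rw [(PySem.List.max?_eq_none_iff L id).mp hm] at hmem; simp at hmem
  · have h1 := PySem.List.max?_isMax hm _ hmem
    have h2 := (PySem.List.le_foldl_max L 0).2 _ (PySem.List.max?_mem hm)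
    simp only [PySem.List.maxD, hm, Option.getD_some, id] at *
    omega

theorem pv_maxD_le (L : List Int) (h : ¬ L.foldl max 0 > 0) :
    PySem.List.maxD L id 0 ≤ 0 := by
  rcases hm : PySem.List.max? L id with _ | m
  · simp [PySem.List.maxD, hm]
  · have h2 := (PySem.List.le_foldl_max L 0).2 _ (PySem.List.max?_mem hm)
    simp only [PySem.List.maxD, hm, Option.getD_some]
    omega

-- ===== VERDICT (by name: the statement is the Claim_ definition above) =====
theorem calc_max_pos_spec : Claim_equal_calc_max_pos := by
  intro x _ _
  unfold Spec_calc_max_pos calc_max_pos calc_max_pos_alt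
  rw [PySem.List.pyRange_of_pos 0 (x.length : Int) (by omega)]
  set k := (if (0:Int) < (x.length : Int) then (((x.length : Int) - 0 + 6 - 1) / 6).toNat else 0) with hk
  set g : Int → Int := fun i =>
    max (max (PySem.List.pyGetD x (i + 3) 0) (PySem.List.pyGetD x (i + 4) 0))
        (PySem.List.pyGetD x (i + 5) 0) with hg
  have hinner : ∀ (i : Int) (s : Int × Int),
      (PySem.List.pyRange 3 6 1).foldl
        (fun (s : Int × Int) j =>
          if PySem.List.pyGetD x (i + j) 0 > s.1 then
            (PySem.List.pyGetD x (i + j) 0, PySem.Int.floordiv i 6)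
          else s) s
      = if g i > s.1 then (g i, PySem.Int.floordiv i 6) else s := by
    intro i s
    have h345 : PySem.List.pyRange 3 6 1 = [3, 4, 5] := by decide
    rw [h345]
    obtain ⟨r, p⟩ := s
    exact pv_three _ _ _ _ r p
  simp only [List.foldl_map, hinner]
  have hdiv : ∀ (j : Nat), PySem.Int.floordiv (0 + 6 * (j : Int)) 6 = (j : Int) := by
    intro j
    have h0 : (0 : Int) + 6 * (j : Int) = ((6 * j : Nat) : Int) := by push_cast; ring
    rw [h0]
    have h1 := PySem.Int.floordiv_natCast (6 * j) 6
    have h2 : 6 * j / 6 = j := by omega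
    rw [h2] at h1
    exact_mod_cast h1
  have hstep : ∀ (s : Int × Int) (j : Nat),
      (if g (0 + 6 * (j : Int)) > s.1 then (g (0 + 6 * (j : Int)), PySem.Int.floordiv (0 + 6 * (j : Int)) 6) else s)
      = (if (fun j : Nat => g (0 + 6 * (j : Int))) j > s.1 then ((fun j : Nat => g (0 + 6 * (j : Int))) j, (j : Int)) else s) := by
    intro s j; rw [hdiv]
  simp only [hstep]
  rw [pvGo_range (fun j : Nat => g (0 + 6 * (j : Int))) k (0, 0)]
  rw [pvGo_spec]
  simp only [List.map_map, Function.comp_def]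
  set L := (List.range k).map (fun j : Nat => g (0 + 6 * (j : Int))) with hL
  by_cases hM : L.foldl max 0 > 0
  · rw [pv_maxD_eq L hM]
    rw [if_pos hM, if_neg (not_le.mpr hM)]
    simp
  · rw [if_neg hM, if_pos (pv_maxD_le L hM)]
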